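-- pv_equiv track=rewrite | github.com/lixin4ever/E2E-TBSA | utils.py | ot2bieos_ts
-- ===== SOURCE A (Python) =====
-- def ot2bieos_ts(ts_tag_sequence):
--     """
--     ot2bieos function for ts task
--     :param ts_tag_sequence: tag sequence for targeted sentiment
--     :return:
--     """
--     n_tags = len(ts_tag_sequence)
--     new_ts_sequence = []
--     prev_pos = '$$$'
--     for i in range(n_tags):
--         cur_ts_tag = ts_tag_sequence[i]
--         if cur_ts_tag == 'O':
--             new_ts_sequence.append('O')
--             cur_pos = 'O'
--         else:
--             cur_pos, cur_sentiment = cur_ts_tag.split('-')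
--             # cur_pos is T
--             if cur_pos != prev_pos:
--                 # prev_pos is O and new_cur_pos can only be B or S
--                 if i == n_tags - 1:
--                     new_ts_sequence.append('S-%s' % cur_sentiment)
--                 else:
--                     next_ts_tag = ts_tag_sequence[i + 1]
--                     if next_ts_tag == 'O':
--                         new_ts_sequence.append('S-%s' % cur_sentiment)
--                     else:
--                         new_ts_sequence.append('B-%s' % cur_sentiment)
--             else:
--                 # prev_pos is T and new_cur_pos can only be I or E
--                 if i == n_tags - 1:
--                     new_ts_sequence.append('E-%s' % cur_sentiment)
--                 else:
--                     next_ts_tag = ts_tag_sequence[i + 1]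
--                     if next_ts_tag == 'O':
--                         new_ts_sequence.append('E-%s' % cur_sentiment)
--                     else:
--                         new_ts_sequence.append('I-%s' % cur_sentiment)
--         prev_pos = cur_pos
--     return new_ts_sequence
-- ===== SOURCE B (Python) =====
-- def ot2bieos_ts(ts_tag_sequence):
--     """Run-segmentation reimplementation: emit 'O' directly; scan each maximal
--     run of consecutive non-'O' tags once and label it S / B,I*,E per sub-run of
--     equal position part (position and sentiment read via tag.split('-'))."""
--     out = []
--     i = 0
--     n = len(ts_tag_sequence)
--     while i < n:
--         if ts_tag_sequence[i] == 'O':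
--             out.append('O')
--             i += 1
--         else:
--             j = i
--             while j < n and ts_tag_sequence[j] != 'O':
--                 j += 1
--             parts = [t.split('-') for t in ts_tag_sequence[i:j]]
--             prev = None
--             m = len(parts)
--             for k in range(m):
--                 pos, sentiment = parts[k]
--                 start = prev is None or pos != prev
--                 if k == m - 1:
--                     out.append(('S-' if start else 'E-') + sentiment)
--                 else:
--                     out.append(('B-' if start else 'I-') + sentiment)
--                 prev = pos
--             i = j
--     return out
-- ===== Notes on version B (the rewrite author's own statement) =====
-- stated objective: simpler
-- what changed: Replaces A's per-position loop with prev_pos state and ts[i+1] lookahead by an explicit run segmentation: 'O' positions are emitted directly, each maximal run of consecutive non-'O' tags is scanned off and labelled S / B,I*,E per sub-run of equal position part in one inner pass.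
-- intended difference: On sequences whose first tag has position part '$$$', or containing a non-'O' tag with position part 'O' immediately after an 'O' tag, A's sentinel prev_pos leaks across the run boundary and A labels the run start as a continuation with E or I; B emits the run-start label S or B, which is the intended BIEOS labelling. — e.g. on ot2bieos_ts(["O", "O-POS"]): A returns ["O", "E-POS"], B returns ["O", "S-POS"]
import Mathlib
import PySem

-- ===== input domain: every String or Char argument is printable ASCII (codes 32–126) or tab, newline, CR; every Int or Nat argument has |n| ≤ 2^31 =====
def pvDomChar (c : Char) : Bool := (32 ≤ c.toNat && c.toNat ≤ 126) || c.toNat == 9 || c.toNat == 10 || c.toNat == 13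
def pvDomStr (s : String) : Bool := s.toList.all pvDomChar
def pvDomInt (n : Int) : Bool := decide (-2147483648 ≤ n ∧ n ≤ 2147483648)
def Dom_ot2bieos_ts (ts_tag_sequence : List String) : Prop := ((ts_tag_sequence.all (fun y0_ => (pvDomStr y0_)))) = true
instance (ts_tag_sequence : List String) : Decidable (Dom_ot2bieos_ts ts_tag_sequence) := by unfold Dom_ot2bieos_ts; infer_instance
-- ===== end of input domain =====

-- B replaces A's per-position prev/next-lookahead loop by an explicit run segmentation
-- (emit 'O' directly, scan off each maximal non-'O' run, label it in one inner pass);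
-- objective: simpler decomposition, same O(n) cost.

-- ===== PORT A =====
-- loop body of A's 'for i in range(n_tags)', state = (new_ts_sequence, prev_pos);
-- the '_ => st' branch is Python's ValueError from 'cur_pos, cur_sentiment = cur_ts_tag.split('-')' (excluded by Pre_)
def bodyA (ts : List String) (n : Int) (st : List String × String) (i : Int) : List String × String :=
  let new_ts := st.1
  let prev_pos := st.2
  let cur_ts_tag := PySem.List.pyGetD ts i ""
  if cur_ts_tag == "O" then (new_ts ++ ["O"], "O")
  else
    match PySem.Str.split? cur_ts_tag "-" with
    | some [cur_pos, cur_sentiment] =>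
      if cur_pos != prev_pos then
        if i == n - 1 then (new_ts ++ ["S-" ++ cur_sentiment], cur_pos)
        else if PySem.List.pyGetD ts (i + 1) "" == "O" then (new_ts ++ ["S-" ++ cur_sentiment], cur_pos)
        else (new_ts ++ ["B-" ++ cur_sentiment], cur_pos)
      else
        if i == n - 1 then (new_ts ++ ["E-" ++ cur_sentiment], cur_pos)
        else if PySem.List.pyGetD ts (i + 1) "" == "O" then (new_ts ++ ["E-" ++ cur_sentiment], cur_pos)
        else (new_ts ++ ["I-" ++ cur_sentiment], cur_pos)
    | _ => st

def ot2bieos_ts (ts_tag_sequence : List String) : List String :=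
  let n_tags : Int := ts_tag_sequence.length
  ((PySem.List.pyRange 0 n_tags 1).foldl (bodyA ts_tag_sequence n_tags)
    (([] : List String), "$$$")).1

-- ===== PORT B =====
-- t.split('-') unpacked into (pos, sentiment); ("", "") stands for the ValueError case (excluded by Pre_)
def splitPairB (t : String) : String × String :=
  match PySem.Str.split? t "-" with
  | some l => if h : l.length = 2 then (l[0], l[1]) else ("", "")
  | none => ("", "")

-- Source B's inner 'for k in range(m)' over the split run, carrying prev (None at run start);
-- 'k == m - 1' is 'rest = []'
def labelPartsB : Option String → List (String × String) → List String
  | _, [] => []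
  | prev?, (pos, sent) :: rest =>
    let start := match prev? with | none => true | some prev => pos != prev
    (match rest with
     | [] => (if start then "S-" else "E-") ++ sent
     | _ :: _ => (if start then "B-" else "I-") ++ sent) :: labelPartsB (some pos) rest

-- Source B's outer 'while i < n' cursor i is represented by the remaining suffix;
-- the inner 'while j < n and ts[j] != 'O'' scan is takeWhile/dropWhile of that suffix
def bLoopB : List String → List String
  | [] => []
  | t :: rest =>
    if t == "O" then "O" :: bLoopB rest
    else
      let run := (t :: rest).takeWhile (fun x => x != "O")
      labelPartsB none (run.map splitPairB) ++ bLoopB ((t :: rest).dropWhile (fun x => x != "O"))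
  termination_by l => l.length
  decreasing_by
    · simp
    · simp only [List.dropWhile_cons]
      have hts : ((fun x => x != "O") t) = true := by simp_all
      simp only [hts, if_true, List.length_cons]
      exact Nat.lt_succ_of_le (List.length_dropWhile_le _ rest)

def ot2bieos_ts_alt (ts_tag_sequence : List String) : List String :=
  bLoopB ts_tag_sequence

-- ===== PRECONDITION & SPEC =====
-- Pre_ excludes exactly the inputs where A raises ValueError: a non-'O' tag whose split on '-' has ≠ 2 pieces
def Pre_ot2bieos_ts (ts_tag_sequence : List String) : Prop :=
  ∀ t ∈ ts_tag_sequence, t = "O" ∨ ((PySem.Str.split? t "-").getD []).length = 2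
instance (ts_tag_sequence : List String) : Decidable (Pre_ot2bieos_ts ts_tag_sequence) := by
  unfold Pre_ot2bieos_ts; infer_instance
def pvWitness_ot2bieos_ts : List String := ["O", "T-POS", "T-NEG", "O", "T-NEU"]

-- D_: on sequences whose first tag has position part '$$$', or with a non-'O' tag of position
-- part 'O' right after an 'O' tag, A's sentinel prev_pos leaks across the run boundary and A
-- labels the run start E/I; B labels it S/B, the intended run-start label.
def posIsB (t q : String) : Bool :=
  let l := (PySem.Str.split? t "-").getD []
  t != "O" && l.length == 2 && l.headD "" == q
def hasBadPairB : List String → Bool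
  | [] => false
  | a :: r => (a == "O" && posIsB (r.headD "O") "O") || hasBadPairB r
def D_ot2bieos_ts (ts_tag_sequence : List String) : Prop :=
  ((match ts_tag_sequence with | t :: _ => posIsB t "$$$" | [] => false) || hasBadPairB ts_tag_sequence) = true
instance (ts_tag_sequence : List String) : Decidable (D_ot2bieos_ts ts_tag_sequence) := by
  unfold D_ot2bieos_ts; infer_instance

def Spec_ot2bieos_ts (ts_tag_sequence : List String) (out : List String) : Prop :=
  ¬ D_ot2bieos_ts ts_tag_sequence → out = ot2bieos_ts_alt ts_tag_sequence
instance (ts_tag_sequence : List String) (out : List String) : Decidable (Spec_ot2bieos_ts ts_tag_sequence out) := by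
  unfold Spec_ot2bieos_ts; infer_instance

def pvDiffWitness_ot2bieos_ts : List String := ["O", "O-POS"]
def pvDiffWitnessOut_ot2bieos_ts : (List String) × (List String) := (["O", "E-POS"], ["O", "S-POS"])

-- ===== CLAIM (what is proved, stated in full; the proofs are below) =====
def Claim_unchanged_ot2bieos_ts : Prop := ∀ (ts_tag_sequence : List String), Dom_ot2bieos_ts ts_tag_sequence → Pre_ot2bieos_ts ts_tag_sequence → Spec_ot2bieos_ts ts_tag_sequence (ot2bieos_ts ts_tag_sequence)
def Claim_exact_ot2bieos_ts : Prop := ∀ (ts_tag_sequence : List String), Dom_ot2bieos_ts ts_tag_sequence → Pre_ot2bieos_ts ts_tag_sequence → D_ot2bieos_ts ts_tag_sequence → ot2bieos_ts ts_tag_sequence ≠ ot2bieos_ts_alt ts_tag_sequence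
def Claim_changed_ot2bieos_ts : Prop := Dom_ot2bieos_ts (pvDiffWitness_ot2bieos_ts) ∧ Pre_ot2bieos_ts (pvDiffWitness_ot2bieos_ts) ∧ D_ot2bieos_ts (pvDiffWitness_ot2bieos_ts) ∧ ot2bieos_ts (pvDiffWitness_ot2bieos_ts) = pvDiffWitnessOut_ot2bieos_ts.1 ∧ ot2bieos_ts_alt (pvDiffWitness_ot2bieos_ts) = pvDiffWitnessOut_ot2bieos_ts.2 ∧ pvDiffWitnessOut_ot2bieos_ts.1 ≠ pvDiffWitnessOut_ot2bieos_ts.2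

-- ===== LEMMAS AND PROOFS =====

-- common recursive reading of A's loop: prev = position part of the previous tag
def isEndG : List String → Bool
  | [] => true
  | nxt :: _ => nxt == "O"

def goA : String → List String → List String
  | _, [] => []
  | prev, cur :: rest =>
    if cur == "O" then "O" :: goA "O" rest
    else
      match PySem.Str.split? cur "-" with
      | some [p, s] =>
        (if p != prev then (if isEndG rest then "S-" else "B-") ++ s
         else (if isEndG rest then "E-" else "I-") ++ s) :: goA p rest
      | _ => goA prev rest

theorem pre_split {t : String}
    (h : t = "O" ∨ ((PySem.Str.split? t "-").getD []).length = 2) (ht : t ≠ "O") :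
    ∃ p s, PySem.Str.split? t "-" = some [p, s] := by
  rcases h with h | h
  · exact absurd h ht
  · rcases hs : PySem.Str.split? t "-" with _ | l
    · rw [hs] at h; simp at h
    · rw [hs] at h; simp at h
      rcases l with _ | ⟨p, _ | ⟨s, _ | ⟨x, xs⟩⟩⟩
      · simp at h
      · simp at h
      · exact ⟨p, s, rfl⟩
      · simp at h

theorem goA_O_cons (q : String) (r : List String) : goA q ("O" :: r) = "O" :: goA "O" r := by
  simp [goA]

-- A's foldl over range(n) from index k, related to goA on the remaining suffix
theorem LA (ts : List String) : ∀ (m k : Nat) (acc : List String) (prev : String),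
    ts.length = k + m →
    ((PySem.List.pyRange (k : Int) (ts.length : Int) 1).foldl (bodyA ts (ts.length : Int)) (acc, prev)).1
      = acc ++ goA prev (ts.drop k) := by
  intro m
  induction m with
  | zero =>
    intro k acc prev hk
    rw [PySem.List.pyRange_one_eq_nil (by omega)]
    simp [List.drop_of_length_le (by omega : ts.length ≤ k), goA]
  | succ m ih =>
    intro k acc prev hk
    have hklt : k < ts.length := by omega
    rw [PySem.List.pyRange_one_cons (by exact_mod_cast hklt)]
    rw [show ((k : Nat) : Int) + 1 = ((k + 1 : Nat) : Int) by push_cast; ring]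
    have hk1 : ((k : Nat) : Int) + 1 = ((k + 1 : Nat) : Int) := by push_cast; ring
    rw [List.foldl_cons]
    have hdrop : ts.drop k = ts[k] :: ts.drop (k + 1) := List.drop_eq_getElem_cons hklt
    rw [hdrop]
    have hget : PySem.List.pyGetD ts ((k : Nat) : Int) "" = ts[k] := by
      rw [PySem.List.pyGetD_natCast]; exact List.getD_eq_getElem ts "" hklt
    by_cases hO : ts[k] = "O"
    · have hb : bodyA ts (ts.length : Int) (acc, prev) (k : Int) = (acc ++ ["O"], "O") := by
        simp [bodyA, hget, hO]
      rw [hb, ih (k + 1) (acc ++ ["O"]) "O" (by omega)]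
      simp [goA, hO]
    · rcases hsp : PySem.Str.split? ts[k] "-" with _ | l
      · have hb : bodyA ts (ts.length : Int) (acc, prev) (k : Int) = (acc, prev) := by
          simp [bodyA, hget, hO, hsp]
        rw [hb, ih (k + 1) acc prev (by omega)]
        simp [goA, hO, hsp]
      · rcases l with _ | ⟨p, _ | ⟨s, _ | ⟨x, xs⟩⟩⟩
        ·
          have hb : bodyA ts (ts.length : Int) (acc, prev) (k : Int) = (acc, prev) := by
            simp [bodyA, hget, hO, hsp]
          rw [hb, ih (k + 1) acc prev (by omega)]
          simp [goA, hO, hsp]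
        · have hb : bodyA ts (ts.length : Int) (acc, prev) (k : Int) = (acc, prev) := by
            simp [bodyA, hget, hO, hsp]
          rw [hb, ih (k + 1) acc prev (by omega)]
          simp [goA, hO, hsp]
        · by_cases hend : k + 1 = ts.length
          · have he1 : (((k : Nat) : Int) == (ts.length : Int) - 1) = true := by
              simp; omega
            have hdrop1 : ts.drop (k + 1) = [] := List.drop_of_length_le (by omega)
            by_cases hpp : p = prev
            · have hb : bodyA ts (ts.length : Int) (acc, prev) (k : Int)
                  = (acc ++ ["E-" ++ s], p) := by
                simp [bodyA, hget, hO, hsp, he1, hpp]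
              rw [hb, ih (k + 1) (acc ++ ["E-" ++ s]) p (by omega)]
              simp [goA, hO, hsp, hdrop1, isEndG, hpp]
            · have hb : bodyA ts (ts.length : Int) (acc, prev) (k : Int)
                  = (acc ++ ["S-" ++ s], p) := by
                simp [bodyA, hget, hO, hsp, he1, hpp]
              rw [hb, ih (k + 1) (acc ++ ["S-" ++ s]) p (by omega)]
              simp [goA, hO, hsp, hdrop1, isEndG, hpp]
          · have hk2 : k + 1 < ts.length := by omega
            have he1 : (((k : Nat) : Int) == (ts.length : Int) - 1) = false := by
              simp; omega
            have hdrop2 : ts.drop (k + 1) = ts[k + 1] :: ts.drop (k + 2) :=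
              List.drop_eq_getElem_cons hk2
            have hnext : PySem.List.pyGetD ts (((k : Nat) : Int) + 1) "" = ts[k + 1] := by
              rw [hk1, PySem.List.pyGetD_natCast]; exact List.getD_eq_getElem ts "" hk2
            rw [hdrop2]
            by_cases hnxO : ts[k + 1] = "O" <;> by_cases hpp : p = prev
            · have hb : bodyA ts (ts.length : Int) (acc, prev) (k : Int)
                  = (acc ++ ["E-" ++ s], p) := by
                simp [bodyA, hget, hO, hsp, he1, hnext, hnxO, hpp]
              rw [hb, ih (k + 1) (acc ++ ["E-" ++ s]) p (by omega), hdrop2]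
              simp [goA, hO, hsp, isEndG, hnxO, hpp]
            · have hb : bodyA ts (ts.length : Int) (acc, prev) (k : Int)
                  = (acc ++ ["S-" ++ s], p) := by
                simp [bodyA, hget, hO, hsp, he1, hnext, hnxO, hpp]
              rw [hb, ih (k + 1) (acc ++ ["S-" ++ s]) p (by omega), hdrop2]
              simp [goA, hO, hsp, isEndG, hnxO, hpp]
            · have hb : bodyA ts (ts.length : Int) (acc, prev) (k : Int)
                  = (acc ++ ["I-" ++ s], p) := by
                simp [bodyA, hget, hO, hsp, he1, hnext, hnxO, hpp]
              rw [hb, ih (k + 1) (acc ++ ["I-" ++ s]) p (by omega), hdrop2]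
              simp [goA, hO, hsp, isEndG, hnxO, hpp]
            · have hb : bodyA ts (ts.length : Int) (acc, prev) (k : Int)
                  = (acc ++ ["B-" ++ s], p) := by
                simp [bodyA, hget, hO, hsp, he1, hnext, hnxO, hpp]
              rw [hb, ih (k + 1) (acc ++ ["B-" ++ s]) p (by omega), hdrop2]
              simp [goA, hO, hsp, isEndG, hnxO, hpp]
        · have hb : bodyA ts (ts.length : Int) (acc, prev) (k : Int) = (acc, prev) := by
            simp [bodyA, hget, hO, hsp]
          rw [hb, ih (k + 1) acc prev (by omega)]
          simp [goA, hO, hsp]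

theorem lemA (ts : List String) : ot2bieos_ts ts = goA "$$$" ts := by
  unfold ot2bieos_ts
  have h0 : ((0 : Int)) = ((0 : Nat) : Int) := by norm_num
  rw [h0, LA ts ts.length 0 [] "$$$" (by omega)]
  simp

-- ===== B side =====

-- one maximal non-'O' run: B's inner labelling pass equals goA on run ++ rest2
theorem L3 : ∀ (run' : List String) (t : String) (prev? : Option String) (prev : String)
    (rest2 : List String),
    (∀ x ∈ t :: run', x ≠ "O" ∧ ∃ p s, PySem.Str.split? x "-" = some [p, s]) →
    (rest2 = [] ∨ ∃ r2, rest2 = "O" :: r2) →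
    (∀ p s, PySem.Str.split? t "-" = some [p, s] →
      (match prev? with | none => true | some q => p != q) = (p != prev)) →
    goA prev ((t :: run') ++ rest2)
      = labelPartsB prev? ((t :: run').map splitPairB) ++ goA "O" rest2 := by
  intro run'
  induction run' with
  | nil =>
    intro t prev? prev rest2 hall hrest hhead
    obtain ⟨ht, p, s, hsp⟩ := hall t (by simp)
    have hstart := hhead p s hsp
    have hend : isEndG rest2 = true := by
      rcases hrest with h | ⟨r2, h⟩ <;> simp [h, isEndG]
    have htail : goA p rest2 = goA "O" rest2 := by
      rcases hrest with h | ⟨r2, h⟩ <;> simp [h, goA_O_cons, goA]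
    simp only [List.cons_append, List.nil_append, goA, List.map_cons, List.map_nil,
      labelPartsB, splitPairB, hsp, hend]
    simp [ht, htail, hstart]
    split_ifs <;> rfl
  | cons t2 run'' ih =>
    intro t prev? prev rest2 hall hrest hhead
    obtain ⟨ht, p, s, hsp⟩ := hall t (by simp)
    obtain ⟨ht2, p2, s2, hsp2⟩ := hall t2 (by simp)
    have hstart := hhead p s hsp
    have hend : isEndG (t2 :: (run'' ++ rest2)) = false := by simp [isEndG, ht2]
    have hihres := ih t2 (some p) p rest2
      (fun x hx => hall x (List.mem_cons_of_mem t hx))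
      hrest (fun p' s' _ => rfl)
    simp only [List.cons_append, goA, List.map_cons, labelPartsB, splitPairB, hsp, hsp2] at hihres ⊢
    simp [ht, ht2, hend, hstart]
    simp [ht2] at hihres
    refine ⟨by split_ifs <;> rfl, ?_, ?_⟩
    · cases hr'' : run'' with
      | nil =>
        have hiend : isEndG rest2 = true := by
          rcases hrest with h | ⟨r2, h⟩ <;> simp [h, isEndG]
        simp [hiend]
        split_ifs <;> rfl
      | cons t3 r3 =>
        obtain ⟨ht3, -⟩ := hall t3 (by simp [hr''])
        simp [isEndG, ht3]
        split_ifs <;> rfl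
    · exact hihres.2

theorem hasBadPairB_tail {a : String} {l : List String} (h : hasBadPairB (a :: l) = false) :
    hasBadPairB l = false := by
  cases l with
  | nil => rfl
  | cons b r =>
    rw [hasBadPairB] at h ⊢
    exact (Bool.or_eq_false_iff.mp h).2

theorem hasBadPairB_suffix : ∀ {l₁ l₂ : List String}, l₂ <:+ l₁ →
    hasBadPairB l₁ = false → hasBadPairB l₂ = false := by
  intro l₁
  induction l₁ with
  | nil => intro l₂ h _; rw [List.suffix_nil.mp h]; rfl
  | cons a r ih =>
    intro l₂ h hf
    rcases List.suffix_cons_iff.mp h with h | h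
    · rw [h]; exact hf
    · exact ih h (hasBadPairB_tail hf)

theorem dropWhile_head_false {p : String → Bool} :
    ∀ (l : List String) (x : String) (r : List String), l.dropWhile p = x :: r → p x = false := by
  intro l
  induction l with
  | nil => intro x r h; simp [List.dropWhile] at h
  | cons a t ih =>
    intro x r h
    rw [List.dropWhile_cons] at h
    by_cases hp : p a = true
    · exact ih x r (by simpa [hp] using h)
    · simp [hp] at h
      rw [← h.1]; simpa using hp

-- B's outer while-loop equals goA, given no bad pair and a run-start-compatible prev
theorem LB : ∀ (n : Nat) (ts : List String), ts.length ≤ n →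
    (∀ t ∈ ts, t = "O" ∨ ((PySem.Str.split? t "-").getD []).length = 2) →
    hasBadPairB ts = false →
    ∀ prev : String,
    (∀ t p s, ts.head? = some t → t ≠ "O" → PySem.Str.split? t "-" = some [p, s] → p ≠ prev) →
    bLoopB ts = goA prev ts := by
  intro n
  induction n with
  | zero =>
    intro ts hlen _ _ prev _
    have hts : ts = [] := List.length_eq_zero_iff.mp (by omega)
    subst hts
    simp [bLoopB, goA]
  | succ n ih =>
    intro ts hlen hpre hbp prev hhead
    cases ts with
    | nil => simp [bLoopB, goA]
    | cons t rest =>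
      by_cases hO : t = "O"
      · subst hO
        rw [goA_O_cons]
        have hrest : bLoopB rest = goA "O" rest := by
          apply ih rest (by simpa using Nat.lt_succ_iff.mp (by simpa using hlen))
            (fun x hx => hpre x (by simp [hx])) (hasBadPairB_tail hbp) "O"
          intro t' p s hh ht' hsp
          cases rest with
          | nil => simp at hh
          | cons t2 r2 =>
            simp at hh; subst hh
            simp [hasBadPairB, posIsB, ht', hsp] at hbp
            intro hpO; subst hpO
            exact hbp.1 rfl
        simp [bLoopB, hrest]
      · have hrun : (t :: rest).takeWhile (fun x => x != "O")
            = t :: rest.takeWhile (fun x => x != "O") := by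
          rw [List.takeWhile_cons]; simp [hO]
        have hdropw : (t :: rest).dropWhile (fun x => x != "O")
            = rest.dropWhile (fun x => x != "O") := by
          rw [List.dropWhile_cons]; simp [hO]
        set rest2 := rest.dropWhile (fun x => x != "O") with hrest2
        have hsplitlist : t :: rest = (t :: rest.takeWhile (fun x => x != "O")) ++ rest2 := by
          simp [hrest2, List.takeWhile_append_dropWhile]
        have hallrun : ∀ x ∈ t :: rest.takeWhile (fun x => x != "O"),
            x ≠ "O" ∧ ∃ p s, PySem.Str.split? x "-" = some [p, s] := by
          intro x hx
          rcases List.mem_cons.mp hx with h | h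
          · subst h; exact ⟨hO, pre_split (hpre x (by simp)) hO⟩
          · have hxne : x ≠ "O" := by
              have hxO := List.mem_takeWhile_imp (p := fun y => y != "O") (l := rest) (x := x) h
              simpa using hxO
            have hxmem : x ∈ rest := (List.takeWhile_sublist _).mem h
            exact ⟨hxne, pre_split (hpre x (by simp [hxmem])) hxne⟩
        have hrestshape : rest2 = [] ∨ ∃ r2, rest2 = "O" :: r2 := by
          cases hr : rest2 with
          | nil => exact Or.inl rfl
          | cons h0 r0 =>
            right
            have := dropWhile_head_false rest h0 r0 (hrest2 ▸ hr)
            have hh0 : h0 = "O" := by simpa using this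
            exact ⟨r0, by rw [hh0]⟩
        have hheadL3 : ∀ p s, PySem.Str.split? t "-" = some [p, s] →
            (true : Bool) = (p != prev) := by
          intro p s hsp
          have := hhead t p s rfl hO hsp
          simp [this]
        have hL3 := L3 (rest.takeWhile (fun x => x != "O")) t none prev rest2
          hallrun hrestshape hheadL3
        have hbtail : bLoopB rest2 = goA "O" rest2 := by
          rcases hrestshape with h | ⟨r2, h⟩
          · simp [h, bLoopB, goA]
          · apply ih rest2
            · have h1 : rest2.length ≤ rest.length := hrest2 ▸ List.length_dropWhile_le _ rest
              have h2 : rest.length ≤ n := by simpa using Nat.lt_succ_iff.mp (by simpa using hlen)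
              omega
            · intro x hx
              have : x ∈ rest := (List.dropWhile_sublist _).mem (hrest2 ▸ hx)
              exact hpre x (by simp [this])
            · exact hasBadPairB_suffix ((hsplitlist ▸ List.suffix_append _ _ : rest2 <:+ t :: rest)) hbp
            · intro t' p s hh ht' hsp
              rw [h] at hh; simp at hh
              exact absurd hh.symm ht'  -- t' = "O" contradicts ht'  (hh : "O" = t'?)
        have hB : bLoopB (t :: rest) = labelPartsB none
            ((t :: rest.takeWhile (fun x => x != "O")).map splitPairB) ++ bLoopB rest2 := by
          rw [bLoopB]
          simp [hO, hrun, hdropw]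
        rw [hB, hbtail, ← hL3, ← hsplitlist]

theorem lemB (ts : List String) (hpre : Pre_ot2bieos_ts ts) (hD : ¬ D_ot2bieos_ts ts) :
    ot2bieos_ts_alt ts = goA "$$$" ts := by
  simp only [D_ot2bieos_ts, Bool.or_eq_true, not_or, Bool.not_eq_true] at hD
  have hhd : ∀ t p s, ts.head? = some t → t ≠ "O" → PySem.Str.split? t "-" = some [p, s] →
      p ≠ "$$$" := by
    intro t p s hh ht hsp hpq
    cases ts with
    | nil => simp at hh
    | cons t0 r =>
      simp at hh; subst hh
      have h1 := hD.1
      simp [posIsB, ht, hsp, hpq] at h1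
  exact LB ts.length ts le_rfl hpre hD.2 "$$$" hhd

-- head of the list is a non-'O' tag whose position part equals prev (A will mislabel the run start)
def badHereP (prev : String) : List String → Prop
  | [] => False
  | t :: _ => t ≠ "O" ∧ ∃ s, PySem.Str.split? t "-" = some [prev, s]

theorem hasBadPairB_cons_ne {a : String} (l : List String) (ha : a ≠ "O") :
    hasBadPairB (a :: l) = hasBadPairB l := by
  rw [hasBadPairB]
  simp [ha]

theorem hasBadPairB_append_run : ∀ (run rest2 : List String), (∀ x ∈ run, x ≠ "O") →
    hasBadPairB (run ++ rest2) = hasBadPairB rest2 := by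
  intro run
  induction run with
  | nil => intro rest2 _; rfl
  | cons a r ih =>
    intro rest2 h
    rw [List.cons_append, hasBadPairB_cons_ne _ (h a (by simp))]
    exact ih rest2 (fun x hx => h x (by simp [hx]))

theorem takeWhile_nil_iff_isEnd (rest : List String) :
    (rest.takeWhile (fun x => x != "O") = [] ↔ isEndG rest = true) := by
  cases rest with
  | nil => simp [isEndG]
  | cons h r =>
    rw [List.takeWhile_cons]
    by_cases hh : h = "O" <;> simp [hh, isEndG]

-- inside the change region B's output really differs from goA (= A's output)
theorem LBdiff : ∀ (n : Nat) (ts : List String), ts.length ≤ n →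
    (∀ t ∈ ts, t = "O" ∨ ((PySem.Str.split? t "-").getD []).length = 2) →
    ∀ prev : String, (badHereP prev ts ∨ hasBadPairB ts = true) →
    bLoopB ts ≠ goA prev ts := by
  intro n
  induction n with
  | zero =>
    intro ts hlen _ prev hbad
    have hts : ts = [] := List.length_eq_zero_iff.mp (by omega)
    subst hts
    rcases hbad with h | h
    · exact absurd h (by simp [badHereP])
    · exact absurd h (by simp [hasBadPairB])
  | succ n ih =>
    intro ts hlen hpre prev hbad
    cases ts with
    | nil =>
      rcases hbad with h | h
      · exact absurd h (by simp [badHereP])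
      · exact absurd h (by simp [hasBadPairB])
    | cons t rest =>
      by_cases hO : t = "O"
      · subst hO
        have hbad' : badHereP "O" rest ∨ hasBadPairB rest = true := by
          rcases hbad with h | h
          · simp [badHereP] at h
          · rw [hasBadPairB] at h
            rcases Bool.or_eq_true_iff.mp h with h | h
            · left
              cases rest with
              | nil => simp [posIsB] at h
              | cons t2 r2 =>
                have h2 := (Bool.and_eq_true_iff.mp h).2
                simp only [List.headD_cons] at h2
                simp only [posIsB, Bool.and_eq_true_iff] at h2
                obtain ⟨⟨ht2, hlen2⟩, hhd2⟩ := h2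
                have ht2' : t2 ≠ "O" := by simpa using ht2
                obtain ⟨p, s, hsp2⟩ := pre_split (hpre t2 (by simp)) ht2'
                refine ⟨ht2', s, ?_⟩
                have hp : p = "O" := by
                  rw [hsp2] at hhd2; simpa using hhd2
                rw [← hp]; exact hsp2
            · exact Or.inr h
        have htail := ih rest (by simpa using Nat.lt_succ_iff.mp (by simpa using hlen))
          (fun x hx => hpre x (by simp [hx])) "O" hbad'
        rw [goA_O_cons, bLoopB]
        simp only [BEq.rfl, if_true]
        intro hcontra
        exact htail (List.cons_eq_cons.mp hcontra).2
      · obtain ⟨p, s, hsp⟩ := pre_split (hpre t (by simp)) hO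
        have hrunB : bLoopB (t :: rest) = labelPartsB none
            ((t :: rest.takeWhile (fun x => x != "O")).map splitPairB)
            ++ bLoopB (rest.dropWhile (fun x => x != "O")) := by
          rw [bLoopB]
          have h1 : (t :: rest).takeWhile (fun x => x != "O")
              = t :: rest.takeWhile (fun x => x != "O") := by
            rw [List.takeWhile_cons]; simp [hO]
          have h2 : (t :: rest).dropWhile (fun x => x != "O")
              = rest.dropWhile (fun x => x != "O") := by
            rw [List.dropWhile_cons]; simp [hO]
          simp [hO, h1, h2]
        have hsplit_t : splitPairB t = (p, s) := by simp [splitPairB, hsp]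
        by_cases hpp : p = prev
        · -- A treats the run start as a continuation: first emitted labels differ
          subst hpp
          rw [hrunB]
          simp only [List.map_cons, hsplit_t, labelPartsB]
          simp only [goA, hsp]
          cases hrw : rest.takeWhile (fun x => x != "O") with
          | nil =>
            have hend : isEndG rest = true := (takeWhile_nil_iff_isEnd rest).mp hrw
            simp [hend, hO]
          | cons q qr =>
            have hend : isEndG rest = false := by
              rcases (not_iff_not.mpr (takeWhile_nil_iff_isEnd rest)) with hiff
              have := hiff.mp (by simp [hrw])
              simpa using this
            simp [hend, hO]
        · -- run start agrees; the difference lies further right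
          have hallrun : ∀ x ∈ t :: rest.takeWhile (fun x => x != "O"),
              x ≠ "O" ∧ ∃ p' s', PySem.Str.split? x "-" = some [p', s'] := by
            intro x hx
            rcases List.mem_cons.mp hx with h | h
            · subst h; exact ⟨hO, p, s, hsp⟩
            · have hxne : x ≠ "O" := by
                have hxO := List.mem_takeWhile_imp (p := fun y => y != "O") (l := rest) (x := x) h
                simpa using hxO
              exact ⟨hxne, pre_split (hpre x (by simp [(List.takeWhile_sublist _).mem h])) hxne⟩
          set rest2 := rest.dropWhile (fun x => x != "O") with hrest2
          have hrestshape : rest2 = [] ∨ ∃ r2, rest2 = "O" :: r2 := by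
            cases hr : rest2 with
            | nil => exact Or.inl rfl
            | cons h0 r0 =>
              right
              have := dropWhile_head_false rest h0 r0 (hrest2 ▸ hr)
              exact ⟨r0, by rw [show h0 = "O" by simpa using this]⟩
          have hsplitlist : t :: rest = (t :: rest.takeWhile (fun x => x != "O")) ++ rest2 := by
            simp [hrest2, List.takeWhile_append_dropWhile]
          have hL3 := L3 (rest.takeWhile (fun x => x != "O")) t none prev rest2
            hallrun hrestshape
            (fun p' s' hsp' => by
              rw [hsp] at hsp'
              have h1 : p = p' := (List.cons.inj (Option.some.inj hsp')).1
              subst h1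
              simp [hpp])
          have hbadrest2 : hasBadPairB rest2 = true := by
            have hrun_ne : ∀ x ∈ t :: rest.takeWhile (fun x => x != "O"), x ≠ "O" :=
              fun x hx => (hallrun x hx).1
            have := hasBadPairB_append_run (t :: rest.takeWhile (fun x => x != "O")) rest2 hrun_ne
            rcases hbad with h | h
            · exfalso
              obtain ⟨-, s', hs'⟩ := h
              rw [hsp] at hs'
              exact hpp (List.cons.inj (Option.some.inj hs')).1
            · rw [hsplitlist] at h; rw [← this]; exact h
          obtain ⟨r2, hr2⟩ : ∃ r2, rest2 = "O" :: r2 := by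
            rcases hrestshape with h | h
            · rw [h] at hbadrest2; simp [hasBadPairB] at hbadrest2
            · exact h
          have hlen2 : rest2.length ≤ n := by
            have h1 : rest2.length ≤ rest.length := hrest2 ▸ List.length_dropWhile_le _ rest
            have h2 : rest.length ≤ n := by simpa using Nat.lt_succ_iff.mp (by simpa using hlen)
            omega
          have hpre2 : ∀ x ∈ rest2, x = "O" ∨ ((PySem.Str.split? x "-").getD []).length = 2 := by
            intro x hx
            exact hpre x (by simp [(List.dropWhile_sublist _).mem (hrest2 ▸ hx)])
          have htail := ih rest2 hlen2 hpre2 "O" (Or.inr hbadrest2)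
          rw [hrunB]
          intro hcontra
          have hA : goA prev (t :: rest)
              = labelPartsB none ((t :: rest.takeWhile (fun x => x != "O")).map splitPairB)
                ++ goA "O" rest2 := by
            conv_lhs => rw [hsplitlist]
            exact hL3
          rw [hA] at hcontra
          exact htail (List.append_cancel_left hcontra)

-- ===== VERDICT (by name: the statement is the Claim_ definition above) =====
theorem ot2bieos_ts_spec : Claim_unchanged_ot2bieos_ts := by
  intro ts _ hpre hD
  rw [lemA ts, lemB ts hpre hD]

theorem ot2bieos_ts_changed : Claim_changed_ot2bieos_ts := by
  unfold Claim_changed_ot2bieos_ts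
  refine ⟨by decide, by decide, by decide, by decide, ?_, by decide⟩
  show ot2bieos_ts_alt pvDiffWitness_ot2bieos_ts = pvDiffWitnessOut_ot2bieos_ts.2
  simp [ot2bieos_ts_alt, pvDiffWitness_ot2bieos_ts, pvDiffWitnessOut_ot2bieos_ts,
        bLoopB, labelPartsB, splitPairB]
  decide

theorem ot2bieos_ts_tight : Claim_exact_ot2bieos_ts := by
  intro ts _ hpre hD
  rw [lemA ts]
  show goA "$$$" ts ≠ ot2bieos_ts_alt ts
  have hbad : badHereP "$$$" ts ∨ hasBadPairB ts = true := by
    simp only [D_ot2bieos_ts, Bool.or_eq_true] at hD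
    rcases hD with h | h
    · left
      cases ts with
      | nil => simp at h
      | cons t0 r =>
        simp only [posIsB, Bool.and_eq_true_iff] at h
        obtain ⟨⟨ht0, hl0⟩, hh0⟩ := h
        have ht0' : t0 ≠ "O" := by simpa using ht0
        obtain ⟨p, s, hsp⟩ := pre_split (hpre t0 (by simp)) ht0'
        refine ⟨ht0', s, ?_⟩
        have hp : p = "$$$" := by rw [hsp] at hh0; simpa using hh0
        rw [← hp]; exact hsp
    · exact Or.inr h
  exact (LBdiff ts.length ts le_rfl hpre "$$$" hbad).symm
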